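-- pv_equiv track=rewrite | github.com/phiweger/zoo | zoo/load.py | extract_records_gb
-- ===== SOURCE A (Python) =====
-- def extract_records_gb(records_handle):
--     '''...'''
--     buffer = []
--     for line in records_handle:
--         if line.startswith('LOCUS') and buffer:
--             # yield accession number and record
--             yield buffer[0].split()[1], ''.join(buffer)
--             buffer = [line]
--         else:
--             buffer.append(line)
--     yield buffer[0].split()[1], ''.join(buffer)
-- ===== SOURCE B (Python) =====
-- def extract_records_gb(records_handle):
--     lines = list(records_handle)
--     n = len(lines)
--     i = 0
--     while i < n:
--         j = i + 1
--         while j < n and not lines[j].startswith('LOCUS'):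
--             j += 1
--         chunk = lines[i:j]
--         yield chunk[0].split()[1], ''.join(chunk)
--         i = j
-- ===== Notes on version B (the rewrite author's own statement) =====
-- stated objective: alternative
-- what changed: B replaces A's incremental buffer accumulation with a two-pointer index scan: it finds the end of each record by advancing an index to the next LOCUS line and slices the chunk out of the list, instead of growing and resetting a buffer line by line.
import Mathlib
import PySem

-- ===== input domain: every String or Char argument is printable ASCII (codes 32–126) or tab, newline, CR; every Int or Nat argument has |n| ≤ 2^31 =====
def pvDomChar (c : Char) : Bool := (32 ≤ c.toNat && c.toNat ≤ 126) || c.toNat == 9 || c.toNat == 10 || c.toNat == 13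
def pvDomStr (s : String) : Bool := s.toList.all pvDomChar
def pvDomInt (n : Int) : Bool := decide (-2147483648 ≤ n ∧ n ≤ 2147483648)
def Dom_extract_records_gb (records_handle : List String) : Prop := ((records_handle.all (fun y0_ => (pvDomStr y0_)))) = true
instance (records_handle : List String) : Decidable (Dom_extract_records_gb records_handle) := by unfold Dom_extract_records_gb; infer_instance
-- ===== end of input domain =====

-- B replaces A's line-by-line buffer accumulation with a two-pointer index scan that
-- slices each record out of the list; same cost (objective: alternative).


-- ===== PORT A =====
-- yield buffer[0].split()[1], ''.join(buffer)  (pyGetD defaults never fire under Pre_)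
def gbYieldA (buffer : List String) : String × String :=
  (PySem.List.pyGetD (PySem.Str.split₀ (PySem.List.pyGetD buffer 0 "")) 1 "",
   PySem.Str.join "" buffer)

def gbStepA (st : List String × List (String × String)) (line : String) :
    List String × List (String × String) :=
  if PySem.Str.startswith line "LOCUS" && !st.1.isEmpty then
    ([line], st.2 ++ [gbYieldA st.1])
  else
    (st.1 ++ [line], st.2)

def extract_records_gb (records_handle : List String) : List (String × String) :=
  let st := records_handle.foldl gbStepA ([], [])
  st.2 ++ [gbYieldA st.1]

-- ===== PORT B =====
-- yield chunk[0].split()[1], ''.join(chunk)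
def gbYieldB (chunk : List String) : String × String :=
  (PySem.List.pyGetD (PySem.Str.split₀ (PySem.List.pyGetD chunk 0 "")) 1 "",
   PySem.Str.join "" chunk)

-- inner 'while j < n and not lines[j].startswith('LOCUS'): j += 1'
-- (lines.getD j "" is exact: the loop only reads lines[j] with j < n)
def gbScan (lines : List String) (n j : Nat) : Nat :=
  if j < n ∧ PySem.Str.startswith (lines.getD j "") "LOCUS" = false then
    gbScan lines n (j + 1)
  else j
termination_by n - j
decreasing_by omega

theorem gbScan_ge (lines : List String) (n j : Nat) : j ≤ gbScan lines n j := by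
  unfold gbScan
  split
  · exact le_trans (Nat.le_succ j) (gbScan_ge lines n (j + 1))
  · exact le_refl j
termination_by n - j
decreasing_by omega

-- outer 'while i < n' loop
def gbOuter (lines : List String) (n i : Nat) : List (String × String) :=
  if _h : i < n then
    let j := gbScan lines n (i + 1)
    gbYieldB (PySem.List.slice lines (some (i : Int)) (some (j : Int))) :: gbOuter lines n j
  else []
termination_by n - i
decreasing_by have := gbScan_ge lines n (i + 1); omega

def extract_records_gb_alt (records_handle : List String) : List (String × String) :=
  gbOuter records_handle records_handle.length 0

-- ===== PRECONDITION & SPEC =====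
-- Pre_ excludes exactly the inputs where the Python A raises IndexError: the empty input
-- (buffer[0] on []), and inputs where some record's first line (line 0, or any line
-- starting with 'LOCUS') has fewer than 2 whitespace-separated tokens (split()[1]).
def Pre_extract_records_gb (records_handle : List String) : Prop :=
  records_handle ≠ [] ∧
  2 ≤ (PySem.Str.split₀ (records_handle.headD "")).length ∧
  ∀ line ∈ records_handle, PySem.Str.startswith line "LOCUS" = true →
    2 ≤ (PySem.Str.split₀ line).length
instance (records_handle : List String) : Decidable (Pre_extract_records_gb records_handle) := by
  unfold Pre_extract_records_gb; infer_instance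

def pvWitness_extract_records_gb : List String :=
  ["LOCUS ab", "atgc", "LOCUS cd x", "ORIGIN"]

def Spec_extract_records_gb (records_handle : List String) (out : List (String × String)) : Prop :=
  out = extract_records_gb_alt records_handle
instance (records_handle : List String) (out : List (String × String)) :
    Decidable (Spec_extract_records_gb records_handle out) := by
  unfold Spec_extract_records_gb; infer_instance

-- ===== CLAIM (what is proved, stated in full; the proofs are below) =====
def Claim_equal_extract_records_gb : Prop := ∀ (records_handle : List String), Dom_extract_records_gb records_handle → Pre_extract_records_gb records_handle → Spec_extract_records_gb records_handle (extract_records_gb records_handle)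


-- ===== LEMMAS AND PROOFS =====

-- unfolding lemmas for the two while-loops of port B
theorem gbScan_stop (lines : List String) (n j : Nat)
    (h : ¬ (j < n ∧ PySem.Str.startswith (lines.getD j "") "LOCUS" = false)) :
    gbScan lines n j = j := by
  rw [gbScan, if_neg h]

theorem gbScan_step (lines : List String) (n j : Nat)
    (h : j < n ∧ PySem.Str.startswith (lines.getD j "") "LOCUS" = false) :
    gbScan lines n j = gbScan lines n (j + 1) := by
  rw [gbScan, if_pos h]

theorem gbOuter_neg (lines : List String) (n i : Nat) (h : ¬ i < n) :
    gbOuter lines n i = [] := by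
  rw [gbOuter, dif_neg h]

theorem gbOuter_pos (lines : List String) (n i : Nat) (h : i < n) :
    gbOuter lines n i
      = gbYieldB (PySem.List.slice lines (some (i : Int))
          (some ((gbScan lines n (i + 1) : Nat) : Int)))
        :: gbOuter lines n (gbScan lines n (i + 1)) := by
  rw [gbOuter, dif_pos h]

-- the common grouping of the lines: each 'LOCUS' line starts a new record
def gbGroups (b : List String) : List String → List (List String)
  | [] => [b]
  | l :: ls =>
    if PySem.Str.startswith l "LOCUS" = true then b :: gbGroups [l] ls
    else gbGroups (b ++ [l]) ls

theorem gbGroups_cons_pos (b : List String) (l : String) (ls : List String)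
    (h : PySem.Str.startswith l "LOCUS" = true) :
    gbGroups b (l :: ls) = b :: gbGroups [l] ls := by
  rw [gbGroups, if_pos h]

theorem gbGroups_cons_neg (b : List String) (l : String) (ls : List String)
    (h : PySem.Str.startswith l "LOCUS" = false) :
    gbGroups b (l :: ls) = gbGroups (b ++ [l]) ls := by
  rw [gbGroups, if_neg (by rw [h]; decide)]

theorem gbYieldA_eq_B : gbYieldA = gbYieldB := rfl

theorem A_run (ls : List String) : ∀ (b : List String) (out : List (String × String)),
    b ≠ [] →
    (ls.foldl gbStepA (b, out)).2 ++ [gbYieldA (ls.foldl gbStepA (b, out)).1]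
      = out ++ (gbGroups b ls).map gbYieldA := by
  induction ls with
  | nil => intro b out _; simp [gbGroups]
  | cons l ls ih =>
    intro b out hb
    by_cases hsw : PySem.Str.startswith l "LOCUS" = true
    · rw [List.foldl_cons,
        show gbStepA (b, out) l = ([l], out ++ [gbYieldA b]) by
          unfold gbStepA
          rw [if_pos (by rw [hsw, List.isEmpty_eq_false_iff.mpr hb]; rfl)],
        ih [l] (out ++ [gbYieldA b]) (by simp),
        gbGroups_cons_pos b l ls hsw]
      simp
    · have hsw' : PySem.Str.startswith l "LOCUS" = false := by
        cases h : PySem.Str.startswith l "LOCUS" <;> simp_all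
      rw [List.foldl_cons,
        show gbStepA (b, out) l = (b ++ [l], out) by
          unfold gbStepA; rw [if_neg (by rw [hsw']; simp)],
        ih (b ++ [l]) out (by simp),
        gbGroups_cons_neg b l ls hsw']

theorem B_run (lines : List String) (k : Nat) : ∀ (i j : Nat), lines.length - j ≤ k → i < j →
    j ≤ lines.length →
    gbYieldB (PySem.List.slice lines (some (i : Int)) (some ((gbScan lines lines.length j : Nat) : Int)))
        :: gbOuter lines lines.length (gbScan lines lines.length j)
      = (gbGroups (PySem.List.slice lines (some (i : Int)) (some ((j : Nat) : Int))) (lines.drop j)).map gbYieldB := by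
  induction k with
  | zero =>
    intro i j hk hij hj
    have hjn : j = lines.length := by omega
    subst hjn
    rw [gbScan_stop _ _ _ (by omega), gbOuter_neg _ _ _ (by omega)]
    simp [List.drop_length, gbGroups]
  | succ k ih =>
    intro i j hk hij hj
    rcases Nat.eq_or_lt_of_le hj with hjn | hjn
    · subst hjn
      rw [gbScan_stop _ _ _ (by omega), gbOuter_neg _ _ _ (by omega)]
      simp [List.drop_length, gbGroups]
    · -- j < lines.length
      have hdrop : lines.drop j = lines[j] :: lines.drop (j + 1) :=
        List.drop_eq_getElem_cons hjn
      have hgetD : lines.getD j "" = lines[j] := List.getD_eq_getElem lines "" hjn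
      by_cases hsw : PySem.Str.startswith lines[j] "LOCUS" = true
      · -- scan stops at j: a LOCUS line starts the next record
        have hsl1 : PySem.List.slice lines (some ((j : Nat) : Int)) (some ((j + 1 : Nat) : Int))
            = [lines[j]] := by
          rw [PySem.List.slice_natCast, show j + 1 - j = 1 by omega, hdrop]
          rfl
        rw [gbScan_stop _ _ _ (by rw [hgetD, hsw]; simp), hdrop,
          gbGroups_cons_pos _ _ _ hsw, List.map_cons]
        congr 1
        rw [gbOuter_pos _ _ _ hjn, ih j (j + 1) (by omega) (by omega) (by omega), hsl1]
      · have hsw' : PySem.Str.startswith lines[j] "LOCUS" = false := by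
          cases h : PySem.Str.startswith lines[j] "LOCUS" <;> simp_all
        have hsl : PySem.List.slice lines (some (i : Int)) (some ((j + 1 : Nat) : Int))
            = PySem.List.slice lines (some (i : Int)) (some ((j : Nat) : Int)) ++ [lines[j]] := by
          rw [PySem.List.slice_natCast, PySem.List.slice_natCast,
            show j + 1 - i = (j - i) + 1 by omega, List.take_add_one, List.getElem?_drop,
            show i + (j - i) = j by omega, List.getElem?_eq_getElem hjn]
          rfl
        rw [gbScan_step _ _ _ (by rw [hgetD]; exact ⟨hjn, hsw'⟩), hdrop,
          gbGroups_cons_neg _ _ _ hsw',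
          ih i (j + 1) (by omega) (by omega) (by omega), hsl]

-- ===== VERDICT (by name: the statement is the Claim_ definition above) =====
theorem extract_records_gb_spec : Claim_equal_extract_records_gb := by
  intro rh _hdom hpre
  unfold Spec_extract_records_gb
  obtain ⟨hne, -, -⟩ := hpre
  obtain ⟨l, ls, rfl⟩ := List.exists_cons_of_ne_nil hne
  -- A side
  have hA : extract_records_gb (l :: ls) = (gbGroups [l] ls).map gbYieldA := by
    unfold extract_records_gb
    rw [List.foldl_cons,
      show gbStepA ([], []) l = ([] ++ [l], []) by
        unfold gbStepA; rw [if_neg (by simp)]]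
    exact A_run ls [l] [] (by simp)
  -- B side
  have hB : extract_records_gb_alt (l :: ls) = (gbGroups [l] ls).map gbYieldB := by
    unfold extract_records_gb_alt
    rw [gbOuter_pos _ _ _ (by simp), show (0 : Nat) + 1 = 1 by omega,
      B_run (l :: ls) ((l :: ls).length - 1) 0 1 (by omega) (by omega) (by simp),
      show PySem.List.slice (l :: ls) (some ((0 : Nat) : Int)) (some ((1 : Nat) : Int)) = [l] by
        rw [PySem.List.slice_natCast]; rfl]
    rfl
  rw [hA, hB, gbYieldA_eq_B]
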